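-- pv_equiv track=rewrite | github.com/TeacherChae/boj | Silver/백준_24495번.py | candidate_possible
-- ===== SOURCE A (Python) =====
-- def candidate_possible(strong, weak, candidate):
--     """
--     candidate가 강한 주사위(strong)를 이기고, 약한 주사위(weak)에게 지는지 확인.
--     candidate와 강한 주사위의 면 4×4 비교에서 candidate가 이기는 횟수가 9 이상이어야 하고,
--     약한 주사위와 candidate의 비교에서 약한 주사위가 이기는 횟수가 9 이상이어야 함.
--     """
--     win_count = 0
--     for c in candidate:
--         for s in strong:
--             if c > s:
--                 win_count += 1
--     loss_count = 0
--     for t in weak: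
--         for c in candidate:
--             if t > c:
--                 loss_count += 1
--     return win_count >= 9 and loss_count >= 9
-- ===== SOURCE B (Python) =====
-- def _bl(xs, x):
--     """Recursive bisect_left: number of elements of sorted xs strictly below x."""
--     if not xs:
--         return 0
--     m = len(xs) // 2
--     if xs[m] < x:
--         return m + 1 + _bl(xs[m + 1:], x)
--     return _bl(xs[:m], x)
--
--
-- def candidate_possible(strong, weak, candidate):
--     ss = sorted(strong)
--     cs = sorted(candidate)
--     win_count = sum(_bl(ss, c) for c in candidate)
--     loss_count = sum(_bl(cs, t) for t in weak)
--     return win_count >= 9 and loss_count >= 9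
-- ===== Notes on version B (the rewrite author's own statement) =====
-- stated objective: alternative
-- what changed: Replaces the nested quadratic scans with sort-once plus a recursive slice-based bisect_left per face: sorted(strong) is binary-searched for each candidate face and a sorted copy of candidate for each weak face, preserving strict '>' via bisect_left.
import Mathlib
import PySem

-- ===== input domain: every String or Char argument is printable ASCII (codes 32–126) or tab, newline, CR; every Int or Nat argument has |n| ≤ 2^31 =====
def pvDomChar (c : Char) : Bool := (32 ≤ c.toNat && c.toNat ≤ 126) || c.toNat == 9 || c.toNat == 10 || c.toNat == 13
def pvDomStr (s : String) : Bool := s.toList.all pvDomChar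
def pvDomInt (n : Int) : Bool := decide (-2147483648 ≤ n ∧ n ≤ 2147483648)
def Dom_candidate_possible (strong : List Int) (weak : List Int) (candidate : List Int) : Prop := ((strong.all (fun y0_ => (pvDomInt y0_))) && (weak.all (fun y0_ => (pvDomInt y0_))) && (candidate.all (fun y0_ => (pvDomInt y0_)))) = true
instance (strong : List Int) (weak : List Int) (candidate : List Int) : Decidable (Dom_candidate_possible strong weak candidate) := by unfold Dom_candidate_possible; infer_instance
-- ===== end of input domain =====

-- B replaces A's nested quadratic scans by sorting once and binary-searching (a recursive bisect_left) per face.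

-- ===== PORT A =====
def candidate_possible (strong : List Int) (weak : List Int) (candidate : List Int) : Bool :=
  let win_count : Int :=
    candidate.foldl (fun acc c => strong.foldl (fun a s => if c > s then a + 1 else a) acc) 0
  let loss_count : Int :=
    weak.foldl (fun acc t => candidate.foldl (fun a c => if t > c then a + 1 else a) acc) 0
  decide (win_count ≥ 9) && decide (loss_count ≥ 9)

-- ===== PORT B =====
-- _bl in Source B: recursive slice-based bisect_left; xs[m] is in range whenever xs ≠ [], so getD is exact
def pvBl (xs : List Int) (x : Int) : Int :=
  if xs = [] then 0
  else
    let m := xs.length / 2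
    if xs.getD m 0 < x then (m : Int) + 1 + pvBl (xs.drop (m + 1)) x
    else pvBl (xs.take m) x
termination_by xs.length
decreasing_by
  · rename_i h _
    have hl : 0 < xs.length := List.length_pos_iff.mpr h
    simp [List.length_drop]; omega
  · rename_i h _
    have hl : 0 < xs.length := List.length_pos_iff.mpr h
    simp [List.length_take]; omega

def candidate_possible_alt (strong : List Int) (weak : List Int) (candidate : List Int) : Bool :=
  let ss := PySem.List.sorted strong (fun v => v) false
  let cs := PySem.List.sorted candidate (fun v => v) false
  let win_count : Int := (candidate.map (fun c => pvBl ss c)).sum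
  let loss_count : Int := (weak.map (fun t => pvBl cs t)).sum
  decide (win_count ≥ 9) && decide (loss_count ≥ 9)

-- ===== PRECONDITION & SPEC =====
def Spec_candidate_possible (strong : List Int) (weak : List Int) (candidate : List Int) (out : Bool) : Prop := out = candidate_possible_alt strong weak candidate
instance (strong : List Int) (weak : List Int) (candidate : List Int) (out : Bool) : Decidable (Spec_candidate_possible strong weak candidate out) := by unfold Spec_candidate_possible; infer_instance

-- ===== CLAIM (what is proved, stated in full; the proofs are below) =====
def Claim_equal_candidate_possible : Prop := ∀ (strong : List Int) (weak : List Int) (candidate : List Int), Dom_candidate_possible strong weak candidate → Spec_candidate_possible strong weak candidate (candidate_possible strong weak candidate)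

-- ===== LEMMAS AND PROOFS =====

-- bisect_left on a sorted list counts the elements strictly below x
theorem pvBl_eq_countP (xs : List Int) (x : Int) (hs : xs.Pairwise (· ≤ ·)) :
    pvBl xs x = (xs.countP (fun v => decide (v < x)) : Int) := by
  induction xs using pvBl.induct x with
  | case1 => simp [pvBl]
  | case2 a b c d e =>
    have hl : 0 < a.length := List.length_pos_iff.mpr b
    have hc : c < a.length := Nat.div_lt_self hl (by omega)
    have hgd : a.getD c 0 = a[c] := List.getD_eq_getElem a 0 hc
    have mono : ∀ i j (hi : i < a.length) (hj : j < a.length), i ≤ j → a[i] ≤ a[j] := by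
      intro i j hi hj hij
      rcases Nat.eq_or_lt_of_le hij with h | h
      · simp [h]
      · exact List.pairwise_iff_getElem.mp hs i j hi hj h
    have ht : (List.take (c+1) a).countP (fun v => decide (v < x)) = c + 1 := by
      rw [List.countP_eq_length.mpr ?_, List.length_take, Nat.min_eq_left (by omega)]
      intro v hv
      obtain ⟨i, hi, hvi⟩ := List.getElem_of_mem hv
      have hi' : i < a.length := by
        have := hi; simp [List.length_take] at this; omega
      rw [List.getElem_take] at hvi
      have : a[i] ≤ a[c] := mono i c hi' hc (by
        have := hi; simp [List.length_take] at this; omega)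
      subst hvi
      simp only [decide_eq_true_eq]
      exact lt_of_le_of_lt this (by rwa [hgd] at d)
    have ihr := e (List.Pairwise.sublist (List.drop_sublist (c+1) a) hs)
    conv_lhs => rw [pvBl]
    rw [if_neg b, if_pos d, ihr]
    conv_rhs => rw [← List.take_append_drop (c+1) a, List.countP_append]
    rw [ht]; have hc2 : c = a.length / 2 := rfl; push_cast; omega
  | case3 a b c d e =>
    have hl : 0 < a.length := List.length_pos_iff.mpr b
    have hc : c < a.length := Nat.div_lt_self hl (by omega)
    have hgd : a.getD c 0 = a[c] := List.getD_eq_getElem a 0 hc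
    have mono : ∀ i j (hi : i < a.length) (hj : j < a.length), i ≤ j → a[i] ≤ a[j] := by
      intro i j hi hj hij
      rcases Nat.eq_or_lt_of_le hij with h | h
      · simp [h]
      · exact List.pairwise_iff_getElem.mp hs i j hi hj h
    have hd : (List.drop c a).countP (fun v => decide (v < x)) = 0 := by
      rw [List.countP_eq_zero]
      intro v hv
      obtain ⟨i, hi, hvi⟩ := List.getElem_of_mem hv
      have hci : c + i < a.length := by simp [List.length_drop] at hi; omega
      rw [List.getElem_drop] at hvi
      have hle : a[c] ≤ a[c + i] := mono c (c + i) hc (by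
        have := hi; simp [List.length_drop] at this; omega) (by omega)
      subst hvi
      simp only [decide_eq_true_eq, not_lt]
      rw [hgd] at d
      exact le_trans (not_lt.mp d) hle
    have ihr := e (List.Pairwise.sublist (List.take_sublist c a) hs)
    conv_lhs => rw [pvBl]
    rw [if_neg b, if_neg d, ihr]
    conv_rhs => rw [← List.take_append_drop c a, List.countP_append]
    rw [hd]; push_cast; omega

-- inner scan of A counts the strong faces below c
theorem foldl_count (c : Int) (xs : List Int) (acc : Int) :
    xs.foldl (fun a s => if c > s then a + 1 else a) acc
      = acc + (xs.countP (fun s => decide (s < c)) : Int) := by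
  induction xs generalizing acc with
  | nil => simp
  | cons y ys ih =>
      by_cases h : y < c <;> simp [h, ih] <;> ring

-- A's nested loop equals the sum of per-face counts
theorem nested_eq_sum (xs : List Int) (cand : List Int) (acc : Int) :
    cand.foldl (fun acc c => xs.foldl (fun a s => if c > s then a + 1 else a) acc) acc
      = acc + (cand.map (fun c => (xs.countP (fun s => decide (s < c)) : Int))).sum := by
  induction cand generalizing acc with
  | nil => simp
  | cons c cs ih =>
      simp only [List.foldl_cons, List.map_cons, List.sum_cons]
      rw [foldl_count, ih]; ring

theorem counts_eq (xs cand : List Int) :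
    (cand.map (fun c => pvBl (PySem.List.sorted xs (fun v => v) false) c)).sum
      = (cand.map (fun c => (xs.countP (fun s => decide (s < c)) : Int))).sum := by
  have hp : (PySem.List.sorted xs (fun v => v) false).Pairwise (· ≤ ·) :=
    PySem.List.sorted_pairwise xs (fun v => v)
  have hperm : (PySem.List.sorted xs (fun v => v) false).Perm xs :=
    PySem.List.sorted_perm xs (fun v => v) false
  congr 1
  refine List.map_congr_left fun c _ => ?_
  rw [pvBl_eq_countP _ _ hp, hperm.countP_eq]

-- ===== VERDICT (by name: the statement is the Claim_ definition above) =====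
theorem candidate_possible_spec : Claim_equal_candidate_possible := by
  intro strong weak candidate _
  unfold Spec_candidate_possible candidate_possible candidate_possible_alt
  simp only [nested_eq_sum, counts_eq, zero_add]
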